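-- pv_equiv track=rewrite | github.com/birukG09/OptimizingCompiler | compiler/optimizer.py | _loop_optimization
-- ===== SOURCE A (Python) =====
-- def _loop_optimization(code_lines):
--     """Basic loop optimizations"""
--     optimized = []
--     in_loop = False
--     loop_start = -1
--
--     for i, line in enumerate(code_lines):
--         line = line.strip()
--
--         # Detect simple loops
--         if 'loop' in line.lower() or 'jmp' in line.lower():
--             if not in_loop:
--                 in_loop = True
--                 loop_start = i
--                 optimized.append(f"; Loop optimization opportunity at line {i}")
--
--         optimized.append(line)
--
--     return optimized
-- ===== SOURCE B (Python) =====
-- def _loop_optimization(code_lines):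
--     """Basic loop optimizations (index-first-then-splice reformulation)."""
--     stripped = [line.strip() for line in code_lines]
--     idx = next((i for i, line in enumerate(stripped)
--                 if 'loop' in line.lower() or 'jmp' in line.lower()), None)
--     if idx is None:
--         return stripped
--     return stripped[:idx] + [f"; Loop optimization opportunity at line {idx}"] + stripped[idx:]
-- ===== Notes on version B (the rewrite author's own statement) =====
-- stated objective: simpler
-- what changed: Since the in_loop flag never resets, at most one annotation is ever emitted; B replaces the stateful flag-carrying loop by stripping all lines, locating the first matching line's index, and splicing the single annotation in before it.
import Mathlib
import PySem

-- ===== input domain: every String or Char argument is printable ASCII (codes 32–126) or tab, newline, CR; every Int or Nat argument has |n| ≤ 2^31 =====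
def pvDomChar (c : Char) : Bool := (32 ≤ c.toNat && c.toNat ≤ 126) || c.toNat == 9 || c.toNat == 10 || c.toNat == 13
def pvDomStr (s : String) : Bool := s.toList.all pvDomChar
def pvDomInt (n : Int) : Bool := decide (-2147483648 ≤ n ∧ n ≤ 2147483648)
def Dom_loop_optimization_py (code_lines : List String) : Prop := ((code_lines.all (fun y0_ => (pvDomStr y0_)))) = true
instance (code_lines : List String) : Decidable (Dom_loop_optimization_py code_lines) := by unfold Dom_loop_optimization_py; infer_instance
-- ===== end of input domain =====

-- B replaces A's stateful one-flag pass by strip-all, find-first-index, splice-annotation: simpler decomposition, same values.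

-- ===== PORT A =====
-- the loop-detection test 'loop' in line.lower() or 'jmp' in line.lower()
def pvHit (line : String) : Bool :=
  PySem.Str.isIn "loop" (PySem.Str.lower line) || PySem.Str.isIn "jmp" (PySem.Str.lower line)

def pvMsg (i : Nat) : String :=
  "; Loop optimization opportunity at line " ++ PySem.Int.toStr (i : Int)

-- the 'for i, line in enumerate(code_lines)' loop, state = (optimized, in_loop, loop_start)
def loopOptGo (i : Nat) (lines : List String) (optimized : List String)
    (in_loop : Bool) (loop_start : Int) : List String :=
  match lines with
  | [] => optimized
  | line :: rest =>
    let line := PySem.Str.strip line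
    if pvHit line then
      if !in_loop then
        loopOptGo (i + 1) rest ((optimized ++ [pvMsg i]) ++ [line]) true (i : Int)
      else
        loopOptGo (i + 1) rest (optimized ++ [line]) in_loop loop_start
    else
      loopOptGo (i + 1) rest (optimized ++ [line]) in_loop loop_start

def loop_optimization_py (code_lines : List String) : List String :=
  loopOptGo 0 code_lines [] false (-1)

-- ===== PORT B =====
def loop_optimization_py_alt (code_lines : List String) : List String :=
  let stripped := code_lines.map PySem.Str.strip
  match stripped.findIdx? pvHit with
  | none => stripped
  | some idx => stripped.take idx ++ [pvMsg idx] ++ stripped.drop idx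

-- ===== PRECONDITION & SPEC =====
def Spec_loop_optimization_py (code_lines : List String) (out : List String) : Prop := out = loop_optimization_py_alt code_lines
instance (code_lines : List String) (out : List String) : Decidable (Spec_loop_optimization_py code_lines out) := by unfold Spec_loop_optimization_py; infer_instance

-- ===== CLAIM (what is proved, stated in full; the proofs are below) =====
def Claim_equal_loop_optimization_py : Prop := ∀ (code_lines : List String), Dom_loop_optimization_py code_lines → Spec_loop_optimization_py code_lines (loop_optimization_py code_lines)

-- ===== LEMMAS AND PROOFS =====

-- once in_loop is true, A just appends the stripped lines
theorem loopOptGo_true (lines : List String) : ∀ (i : Nat) (opt : List String) (ls : Int),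
    loopOptGo i lines opt true ls = opt ++ lines.map PySem.Str.strip := by
  induction lines with
  | nil => intro i opt ls; simp [loopOptGo]
  | cons l t ih =>
    intro i opt ls
    simp only [loopOptGo, List.map_cons, Bool.not_true]
    split_ifs <;> simp_all [List.append_assoc]

-- while in_loop is false, A computes exactly B's find-then-splice shape (annotation index offset by i)
theorem loopOptGo_false (lines : List String) : ∀ (i : Nat) (opt : List String) (ls : Int),
    loopOptGo i lines opt false ls =
      opt ++ (match (lines.map PySem.Str.strip).findIdx? pvHit with
              | none => lines.map PySem.Str.strip
              | some j => (lines.map PySem.Str.strip).take j ++ [pvMsg (i + j)]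
                          ++ (lines.map PySem.Str.strip).drop j) := by
  induction lines with
  | nil => intro i opt ls; simp [loopOptGo]
  | cons l t ih =>
    intro i opt ls
    simp only [loopOptGo, List.map_cons, List.findIdx?_cons]
    by_cases h : pvHit (PySem.Str.strip l)
    · simp [h, loopOptGo_true, List.append_assoc]
    · simp only [h, Bool.false_eq_true, if_false, ih (i + 1)]
      cases hf : (t.map PySem.Str.strip).findIdx? pvHit with
      | none => simp [List.append_assoc]
      | some j =>
        simp only [Option.map_some]
        have : i + 1 + j = i + (j + 1) := by omega
        simp [this, List.append_assoc]

-- ===== VERDICT (by name: the statement is the Claim_ definition above) =====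
theorem loop_optimization_py_spec : Claim_equal_loop_optimization_py := by
  intro code_lines _
  show loop_optimization_py code_lines = loop_optimization_py_alt code_lines
  unfold loop_optimization_py loop_optimization_py_alt
  rw [loopOptGo_false]
  cases hf : (code_lines.map PySem.Str.strip).findIdx? pvHit <;> simp [hf]
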